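-- pv_equiv track=rewrite | github.com/HeyyMrDJ/code_repo | programming/python/hackerrank/4-min_max_score/main.py | new_count_min_max
-- ===== SOURCE A (Python) =====
-- def new_count_min_max(player_scores: list) -> list:
--     'Test'
--     score_list = [0, 0]
--     count_list = [0, 0]
--     for i, score in enumerate(player_scores):
--         if i == 0:
--             score_list[1] = score
--             score_list[0] = score
--         elif score < score_list[1]:
--             score_list[1] = score
--             count_list[1] += 1
--         elif score > score_list[0]:
--             score_list[0] = score
--             count_list[0] += 1
--     return count_list
-- ===== SOURCE B (Python) =====
-- def _accumulate(xs, f):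
--     'prefix-fold: [x0, f(x0,x1), f(f(x0,x1),x2), ...]'
--     out = []
--     for x in xs:
--         out.append(x if not out else f(out[-1], x))
--     return out
--
--
-- def new_count_min_max(player_scores: list) -> list:
--     maxs = _accumulate(player_scores, max)
--     mins = _accumulate(player_scores, min)
--     high = sum(1 for a, b in zip(maxs, maxs[1:]) if b > a)
--     low = sum(1 for a, b in zip(mins, mins[1:]) if b < a)
--     return [high, low]
-- ===== Notes on version B (the rewrite author's own statement) =====
-- stated objective: alternative
-- what changed: Replaces A's single stateful loop (running min/max + counters, with an i==0 special case) by building the running-max and running-min prefix sequences via an accumulate helper and then counting strict transitions between adjacent elements in a second pass.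
import Mathlib
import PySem

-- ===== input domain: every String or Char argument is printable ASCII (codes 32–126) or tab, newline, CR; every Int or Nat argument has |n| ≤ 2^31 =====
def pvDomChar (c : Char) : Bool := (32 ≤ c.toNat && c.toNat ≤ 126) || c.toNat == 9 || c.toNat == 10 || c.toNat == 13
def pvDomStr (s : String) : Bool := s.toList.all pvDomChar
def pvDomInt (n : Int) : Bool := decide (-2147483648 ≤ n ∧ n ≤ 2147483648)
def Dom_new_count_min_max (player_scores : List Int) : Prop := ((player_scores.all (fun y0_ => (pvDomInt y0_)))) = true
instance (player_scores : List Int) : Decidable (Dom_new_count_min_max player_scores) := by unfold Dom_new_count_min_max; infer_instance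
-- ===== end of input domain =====

-- B replaces A's single stateful record-tracking loop by two accumulate (running-extreme)
-- sequences followed by a pairwise-transition count (objective: alternative decomposition).

-- ===== PORT A =====
-- state: ((score_list[0], score_list[1]), (count_list[0], count_list[1]))
def new_count_min_max (player_scores : List Int) : List Int :=
  let r := (PySem.List.enumerate player_scores).foldl
    (fun (st : (Int × Int) × (Int × Int)) (p : Int × Int) =>
      if p.1 == 0 then ((p.2, p.2), st.2)
      else if p.2 < st.1.2 then ((st.1.1, p.2), (st.2.1, st.2.2 + 1))
      else if p.2 > st.1.1 then ((p.2, st.1.2), (st.2.1 + 1, st.2.2))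
      else st)
    ((0, 0), (0, 0))
  [r.2.1, r.2.2]

-- ===== PORT B =====
-- _accumulate's loop after the first append: cur = out[-1]
def pvAccumGo (f : Int → Int → Int) (cur : Int) : List Int → List Int
  | [] => []
  | x :: xs => f cur x :: pvAccumGo f (f cur x) xs

-- _accumulate(xs, f)
def pvAccum (f : Int → Int → Int) : List Int → List Int
  | [] => []
  | x :: xs => x :: pvAccumGo f x xs

def new_count_min_max_alt (player_scores : List Int) : List Int :=
  let maxs := pvAccum max player_scores
  let mins := pvAccum min player_scores
  let high := (maxs.zip (maxs.drop 1)).foldl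
    (fun (n : Int) (p : Int × Int) => if p.2 > p.1 then n + 1 else n) 0
  let low := (mins.zip (mins.drop 1)).foldl
    (fun (n : Int) (p : Int × Int) => if p.2 < p.1 then n + 1 else n) 0
  [high, low]

-- ===== PRECONDITION & SPEC =====
def Spec_new_count_min_max (player_scores : List Int) (out : List Int) : Prop := out = new_count_min_max_alt player_scores
instance (player_scores : List Int) (out : List Int) : Decidable (Spec_new_count_min_max player_scores out) := by unfold Spec_new_count_min_max; infer_instance

-- ===== CLAIM (what is proved, stated in full; the proofs are below) =====
def Claim_equal_new_count_min_max : Prop := ∀ (player_scores : List Int), Dom_new_count_min_max player_scores → Spec_new_count_min_max player_scores (new_count_min_max player_scores)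

-- ===== LEMMAS AND PROOFS =====

-- number of strict increases along the running-max chain started at c
def upCnt : Int → List Int → Int
  | _, [] => 0
  | c, x :: xs => (if max c x > c then 1 else 0) + upCnt (max c x) xs

def dnCnt : Int → List Int → Int
  | _, [] => 0
  | c, x :: xs => (if min c x < c then 1 else 0) + dnCnt (min c x) xs

theorem pairsFold_up (c : Int) (xs : List Int) (n : Int) :
    (((c :: pvAccumGo max c xs).zip (pvAccumGo max c xs)).foldl
      (fun (n : Int) (p : Int × Int) => if p.2 > p.1 then n + 1 else n) n)
    = n + upCnt c xs := by
  induction xs generalizing c n with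
  | nil => simp [pvAccumGo, upCnt]
  | cons x xs ih =>
    simp only [pvAccumGo, List.zip_cons_cons, List.foldl_cons, upCnt]
    rw [ih]
    split <;> ring

theorem pairsFold_dn (c : Int) (xs : List Int) (n : Int) :
    (((c :: pvAccumGo min c xs).zip (pvAccumGo min c xs)).foldl
      (fun (n : Int) (p : Int × Int) => if p.2 < p.1 then n + 1 else n) n)
    = n + dnCnt c xs := by
  induction xs generalizing c n with
  | nil => simp [pvAccumGo, dnCnt]
  | cons x xs ih =>
    simp only [pvAccumGo, List.zip_cons_cons, List.foldl_cons, dnCnt]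
    rw [ih]
    split <;> ring

theorem loopA (xs : List Int) : ∀ (k mx mn c0 c1 : Int), 1 ≤ k → mn ≤ mx →
    ((PySem.List.enumerate xs k).foldl
      (fun (st : (Int × Int) × (Int × Int)) (p : Int × Int) =>
        if p.1 == 0 then ((p.2, p.2), st.2)
        else if p.2 < st.1.2 then ((st.1.1, p.2), (st.2.1, st.2.2 + 1))
        else if p.2 > st.1.1 then ((p.2, st.1.2), (st.2.1 + 1, st.2.2))
        else st)
      ((mx, mn), (c0, c1)))
    = ((xs.foldl max mx, xs.foldl min mn), (c0 + upCnt mx xs, c1 + dnCnt mn xs)) := by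
  induction xs with
  | nil => intro k mx mn c0 c1 hk h; simp [PySem.List.enumerate_nil, upCnt, dnCnt]
  | cons x xs ih =>
    intro k mx mn c0 c1 hk h
    rw [PySem.List.enumerate_cons, List.foldl_cons]
    have hk0 : (k == (0 : Int)) = false := by simp; omega
    simp only [hk0, Bool.false_eq_true, if_false]
    by_cases h1 : x < mn
    · have hmin : min mn x = x := by omega
      have hmax : max mx x = mx := by omega
      simp only [h1, if_pos]
      rw [ih (k+1) mx x c0 (c1+1) (by omega) (by omega)]
      simp only [List.foldl_cons, upCnt, dnCnt, hmin, hmax]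
      refine Prod.ext rfl (Prod.ext ?_ ?_) <;> dsimp only <;> split_ifs <;> omega
    · by_cases h2 : x > mx
      · have hmin : min mn x = mn := by omega
        have hmax : max mx x = x := by omega
        simp only [h1, if_false, h2, if_pos]
        rw [ih (k+1) x mn (c0+1) c1 (by omega) (by omega)]
        simp only [List.foldl_cons, upCnt, dnCnt, hmin, hmax]
        refine Prod.ext rfl (Prod.ext ?_ ?_) <;> dsimp only <;> split_ifs <;> omega
      · have hmin : min mn x = mn := by omega
        have hmax : max mx x = mx := by omega
        simp only [h1, if_false, h2]
        rw [ih (k+1) mx mn c0 c1 (by omega) h]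
        simp only [List.foldl_cons, upCnt, dnCnt, hmin, hmax]
        refine Prod.ext rfl (Prod.ext ?_ ?_) <;> dsimp only <;> split_ifs <;> omega

theorem new_count_min_max_eq (xs : List Int) :
    new_count_min_max xs = new_count_min_max_alt xs := by
  cases xs with
  | nil => rfl
  | cons x xs =>
    show new_count_min_max (x :: xs) = new_count_min_max_alt (x :: xs)
    unfold new_count_min_max new_count_min_max_alt
    rw [PySem.List.enumerate_cons, List.foldl_cons]
    simp only [pvAccum, beq_self_eq_true, if_pos, List.drop_succ_cons, List.drop_zero,
      pairsFold_up, pairsFold_dn]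
    rw [loopA xs (0 + 1) x x 0 0 (by omega) le_rfl]

-- ===== VERDICT (by name: the statement is the Claim_ definition above) =====
theorem new_count_min_max_spec : Claim_equal_new_count_min_max := by
  intro xs _
  unfold Spec_new_count_min_max
  exact new_count_min_max_eq xs
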